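-- pv_equiv track=rewrite | github.com/mike-altonji/nj-transit-delays-app | Python Preprocessing/summarize_tweets.py | right_station
-- ===== SOURCE A (Python) =====
-- def ldist(s1, s2):
--     """
--     Finds the textual distance between two strings.
--     In our case, it is a comparison between a set of pre-existing station names
--     versus raw station names in tweets. Allows for misspelled station names.
--     """
--     if len(s1) > len(s2):
--         s1, s2 = s2, s1
--
--     distances = range(len(s1) + 1)
--     for i2, c2 in enumerate(s2):
--         distances_ = [i2+1]
--         for i1, c1 in enumerate(s1):
--             if c1 == c2:
--                 distances_.append(distances[i1])
--             else:
--                 distances_.append(1 + min((distances[i1], distances[i1 + 1], distances_[-1])))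
--         distances = distances_
--     return distances[-1]
--
-- def right_station(text, stations):
--     """
--     Matches known station names to raw station names from tweets.
--     Leverages 'ldist' function to make string comparisons, but also contains
--     some heuristic logic based on common station abbreviations.
--     """
--     if text in ['hob', 'nyps', 'nps', 'sec', 'aberdeen', 'matawan']:
--         if text == 'hob': selection = 'hoboken'
--         elif text == 'nyps': selection = 'psny'
--         elif text == 'nps': selection = 'newark penn station'
--         elif text == 'sec': selection = 'secaucus'
--         elif text in ['matawan', 'aberdeen']: selection = 'aberdeenmatawan'
--         else: selection = 'Error'
--     else:
--         minimum = 999999999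
--         selection = 'None'
--         for station in stations:
--             value = ldist(text, station)
--             if value < minimum:
--                 minimum = value
--                 selection = station
--     return selection
-- ===== SOURCE B (Python) =====
-- _ABBREV = {
--     'hob': 'hoboken',
--     'nyps': 'psny',
--     'nps': 'newark penn station',
--     'sec': 'secaucus',
--     'aberdeen': 'aberdeenmatawan',
--     'matawan': 'aberdeenmatawan',
-- }
--
--
-- def ldist(s1, s2):
--     """
--     Levenshtein distance via top-down memoized recursion over prefix lengths:
--     edit(i, j) is the distance between s1[:i] and s2[:j].
--     """
--     memo = {}
--
--     def edit(i, j):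
--         key = (i, j)
--         if key in memo:
--             return memo[key]
--         if i == 0:
--             r = j
--         elif j == 0:
--             r = i
--         elif s1[i - 1] == s2[j - 1]:
--             r = edit(i - 1, j - 1)
--         else:
--             r = 1 + min(edit(i - 1, j), edit(i, j - 1), edit(i - 1, j - 1))
--         memo[key] = r
--         return r
--
--     return edit(len(s1), len(s2))
--
--
-- def right_station(text, stations):
--     if text in _ABBREV:
--         return _ABBREV[text]
--     minimum = 999999999
--     selection = 'None'
--     for station in stations:
--         value = ldist(text, station)
--         if value < minimum:
--             minimum = value
--             selection = station
--     return selection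
-- ===== Notes on version B (the rewrite author's own statement) =====
-- stated objective: alternative
-- what changed: ldist's iterative rolling-row DP (with the swap-to-the-shorter-string trick) is replaced by a top-down memoized recursion over prefix lengths edit(i,j), and the abbreviation if-chain by a dict lookup; the first-min-wins selection loop is kept.
import Mathlib
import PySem

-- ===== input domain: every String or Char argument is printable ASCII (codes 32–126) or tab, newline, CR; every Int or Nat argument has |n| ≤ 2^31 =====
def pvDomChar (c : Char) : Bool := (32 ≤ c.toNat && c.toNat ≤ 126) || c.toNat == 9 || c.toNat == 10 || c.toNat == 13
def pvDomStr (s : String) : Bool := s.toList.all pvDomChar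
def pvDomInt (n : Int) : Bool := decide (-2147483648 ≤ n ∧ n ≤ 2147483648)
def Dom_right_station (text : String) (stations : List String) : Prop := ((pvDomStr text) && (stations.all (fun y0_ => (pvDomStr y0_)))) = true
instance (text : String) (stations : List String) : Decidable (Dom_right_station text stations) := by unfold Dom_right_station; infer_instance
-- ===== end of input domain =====

-- B replaces ldist's iterative rolling-row DP (with the swap-to-shorter trick) by a top-down
-- memoized recursion over prefix lengths, and the abbreviation if-chain by a dict lookup
-- (objective: alternative decomposition, same cost).

-- ===== PORT A =====
-- inner loop body of ldist: builds distances_ by appending, reading distances[i1], distances[i1+1], distances_[-1]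
def pvInnerA (c2 : Char) (distances : List Nat) (acc : List Nat) (p : Int × Char) : List Nat :=
  if p.2 == c2 then
    acc ++ [PySem.List.pyGetD distances p.1 0]
  else
    acc ++ [1 + min (PySem.List.pyGetD distances p.1 0)
                 (min (PySem.List.pyGetD distances (p.1 + 1) 0) (PySem.List.pyGetD acc (-1) 0))]

-- outer loop body of ldist: one row, distances_ starts as [i2+1]
def pvOuterA (a : List Char) (distances : List Nat) (p : Int × Char) : List Nat :=
  (PySem.List.enumerate a).foldl (pvInnerA p.2 distances) [p.1.toNat + 1]

def pyLdistA (s1 s2 : List Char) : Nat :=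
  let pr := if s1.length > s2.length then (s2, s1) else (s1, s2)
  PySem.List.pyGetD ((PySem.List.enumerate pr.2).foldl (pvOuterA pr.1) (List.range (pr.1.length + 1))) (-1) 0

def right_station (text : String) (stations : List String) : String :=
  if text ∈ (["hob", "nyps", "nps", "sec", "aberdeen", "matawan"] : List String) then
    if text == "hob" then "hoboken"
    else if text == "nyps" then "psny"
    else if text == "nps" then "newark penn station"
    else if text == "sec" then "secaucus"
    else if text ∈ (["matawan", "aberdeen"] : List String) then "aberdeenmatawan"
    else "Error"
  else
    (stations.foldl (fun (st : Nat × String) station =>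
        let value := pyLdistA text.toList station.toList
        if value < st.1 then (value, station) else st)
      (999999999, "None")).2

-- ===== PORT B =====
-- edit(i, j) = distance between s1[:i] and s2[:j], top-down with the memo dict threaded
-- through exactly as Source B does (check memo, compute r by the same if/elif chain, store r);
-- indices i-1, j-1 are always in range, so getD's default is never read
def pvGo (s1 s2 : List Char) (i j : Nat) (memo : PySem.Dict (Nat × Nat) Nat) :
    Nat × PySem.Dict (Nat × Nat) Nat :=
  match memo.get? (i, j) with
  | some r => (r, memo)
  | none =>
    let rm : Nat × PySem.Dict (Nat × Nat) Nat :=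
      if i = 0 then (j, memo)
      else if j = 0 then (i, memo)
      else if s1.getD (i - 1) ' ' == s2.getD (j - 1) ' ' then pvGo s1 s2 (i - 1) (j - 1) memo
      else
        let p1 := pvGo s1 s2 (i - 1) j memo
        let p2 := pvGo s1 s2 i (j - 1) p1.2
        let p3 := pvGo s1 s2 (i - 1) (j - 1) p2.2
        (1 + min p1.1 (min p2.1 p3.1), p3.2)
    (rm.1, rm.2.insert (i, j) rm.1)
  termination_by (i, j)
  decreasing_by
  · exact Prod.Lex.left _ _ (by omega)
  · exact Prod.Lex.left _ _ (by omega)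
  · exact Prod.Lex.right _ (by omega)
  · exact Prod.Lex.left _ _ (by omega)

def pyLdistB (s1 s2 : List Char) : Nat :=
  (pvGo s1 s2 s1.length s2.length PySem.Dict.empty).1

def pvAbbrev : PySem.Dict String String :=
  PySem.Dict.mk [("hob", "hoboken"), ("nyps", "psny"), ("nps", "newark penn station"),
                 ("sec", "secaucus"), ("aberdeen", "aberdeenmatawan"), ("matawan", "aberdeenmatawan")]

def right_station_alt (text : String) (stations : List String) : String :=
  match pvAbbrev.get? text with
  | some sel => sel
  | none =>
    (stations.foldl (fun (st : Nat × String) station =>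
        let value := pyLdistB text.toList station.toList
        if value < st.1 then (value, station) else st)
      (999999999, "None")).2

-- ===== PRECONDITION & SPEC =====
def Spec_right_station (text : String) (stations : List String) (out : String) : Prop := out = right_station_alt text stations
instance (text : String) (stations : List String) (out : String) : Decidable (Spec_right_station text stations out) := by unfold Spec_right_station; infer_instance

-- ===== CLAIM (what is proved, stated in full; the proofs are below) =====
def Claim_equal_right_station : Prop := ∀ (text : String) (stations : List String), Dom_right_station text stations → Spec_right_station text stations (right_station text stations)

-- ===== LEMMAS AND PROOFS =====

-- proof-side specification of edit(i, j) (the pure recursion the memoized pvGo computes)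
def pvEditB (s1 s2 : List Char) : Nat → Nat → Nat
  | 0, j => j
  | i + 1, 0 => i + 1
  | i + 1, j + 1 =>
    if s1.getD i ' ' == s2.getD j ' ' then pvEditB s1 s2 i j
    else 1 + min (pvEditB s1 s2 i (j + 1)) (min (pvEditB s1 s2 (i + 1) j) (pvEditB s1 s2 i j))
  termination_by i j => (i, j)

-- the memo only ever holds correct edit distances
def pvEInv (s1 s2 : List Char) (m : PySem.Dict (Nat × Nat) Nat) : Prop :=
  ∀ p r, m.get? p = some r → r = pvEditB s1 s2 p.1 p.2

theorem pvGo_correct (s1 s2 : List Char) :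
    ∀ n i j (m : PySem.Dict (Nat × Nat) Nat), i + j ≤ n → pvEInv s1 s2 m →
      (pvGo s1 s2 i j m).1 = pvEditB s1 s2 i j ∧ pvEInv s1 s2 (pvGo s1 s2 i j m).2 := by
  intro n
  induction n using Nat.strong_induction_on with
  | _ n ih =>
    intro i j m hle hm
    rw [pvGo]
    cases hget : m.get? (i, j) with
    | some r =>
      exact ⟨hm (i, j) r hget, hm⟩
    | none =>
      have hins : ∀ (d : PySem.Dict (Nat × Nat) Nat) (v : Nat), pvEInv s1 s2 d →
          v = pvEditB s1 s2 i j → pvEInv s1 s2 (d.insert (i, j) v) := by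
        intro d v hd hv p r hp
        rw [PySem.Dict.get?_insert] at hp
        by_cases hpe : p = (i, j)
        · rw [if_pos hpe] at hp
          cases hp; rw [hpe, hv]
        · rw [if_neg hpe] at hp
          exact hd p r hp
      by_cases hi : i = 0
      · subst hi
        exact ⟨by simp [pvEditB], hins m j hm (by simp [pvEditB])⟩
      · obtain ⟨i', rfl⟩ : ∃ i', i = i' + 1 := ⟨i - 1, by omega⟩
        by_cases hj : j = 0
        · subst hj
          simp only [if_neg hi]
          exact ⟨by simp [pvEditB], hins m (i' + 1) hm (by simp [pvEditB])⟩
        · obtain ⟨j', rfl⟩ : ∃ j', j = j' + 1 := ⟨j - 1, by omega⟩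
          simp only [if_neg hi, if_neg hj, Nat.add_sub_cancel]
          by_cases hc : (s1.getD i' ' ' == s2.getD j' ' ') = true
          · simp only [if_pos hc]
            have h1 := ih (n - 1) (by omega) i' j' m (by omega) hm
            have hval : pvEditB s1 s2 (i' + 1) (j' + 1) = pvEditB s1 s2 i' j' := by
              simp only [pvEditB]; rw [if_pos hc]
            refine ⟨by rw [hval]; exact h1.1, hins _ _ h1.2 (by rw [h1.1, hval])⟩
          · simp only [if_neg hc]
            have h1 := ih (n - 1) (by omega) i' (j' + 1) m (by omega) hm
            have h2 := ih (n - 1) (by omega) (i' + 1) j' _ (by omega) h1.2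
            have h3 := ih (n - 1) (by omega) i' j' _ (by omega) h2.2
            have hval : pvEditB s1 s2 (i' + 1) (j' + 1)
                = 1 + min (pvEditB s1 s2 i' (j' + 1))
                    (min (pvEditB s1 s2 (i' + 1) j') (pvEditB s1 s2 i' j')) := by
              simp only [pvEditB]; rw [if_neg hc]
            refine ⟨by rw [h1.1, h2.1, h3.1, hval], hins _ _ h3.2 (by rw [h1.1, h2.1, h3.1, hval])⟩

-- the DP row after processing the first k characters of b
def pvRow (a b : List Char) (k : Nat) : List Nat :=
  (List.range (a.length + 1)).map (fun j => pvEditB a b j k)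

theorem pvEditB_zero_right (s t : List Char) (i : Nat) : pvEditB s t i 0 = i := by
  cases i <;> simp [pvEditB]

theorem pvEditB_symm (s t : List Char) (i j : Nat) : pvEditB s t i j = pvEditB t s j i := by
  induction i, j using pvEditB.induct s t with
  | case1 j => simp [pvEditB, pvEditB_zero_right]
  | case2 i => simp [pvEditB, pvEditB_zero_right]
  | case3 i j h ih =>
    have h2 : (t.getD j ' ' == s.getD i ' ') = true := beq_iff_eq.mpr (beq_iff_eq.mp h).symm
    simp only [pvEditB]
    rw [if_pos h, if_pos h2, ih]
  | case4 i j h ih1 ih2 ih3 =>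
    have h2 : ¬ (t.getD j ' ' == s.getD i ' ') = true :=
      fun hb => h (beq_iff_eq.mpr (beq_iff_eq.mp hb).symm)
    simp only [pvEditB]
    rw [if_neg h, if_neg h2, ih1, ih2, ih3]
    omega

theorem pvRow_getD (a b : List Char) (k j : Nat) (hj : j ≤ a.length) :
    (pvRow a b k).getD j 0 = pvEditB a b j k := by
  simp [pvRow, List.getD, Nat.lt_succ_of_le hj]

theorem pvInner_take (a b : List Char) (k : Nat) :
    ∀ t, t ≤ a.length →
      (PySem.List.enumerate (a.take t)).foldl (pvInnerA (b.getD k ' ') (pvRow a b k)) [k + 1]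
        = (List.range (t + 1)).map (fun j => pvEditB a b j (k + 1)) := by
  intro t ht
  induction t with
  | zero => simp [PySem.List.enumerate_nil, pvEditB]
  | succ t ih =>
    have ht' : t < a.length := ht
    have htake : a.take (t + 1) = a.take t ++ [a.getD t ' '] := by
      rw [List.take_add_one]
      simp [List.getD, List.getElem?_eq_getElem ht']
    rw [htake, PySem.List.enumerate_append, List.foldl_append, ih (Nat.le_of_lt ht')]
    have hlen : (a.take t).length = t := List.length_take_of_le (Nat.le_of_lt ht')
    simp only [PySem.List.enumerate_cons, PySem.List.enumerate_nil, List.foldl_cons,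
      List.foldl_nil, hlen]
    have hlast : PySem.List.pyGetD ((List.range (t + 1)).map (fun j => pvEditB a b j (k + 1))) (-1) 0
        = pvEditB a b t (k + 1) := by
      rw [List.range_succ, List.map_append]
      simp [PySem.List.pyGetD_neg_one_append_singleton]
    have hd1 : PySem.List.pyGetD (pvRow a b k) ((0 : Int) + t) 0 = pvEditB a b t k := by
      rw [show ((0 : Int) + t) = ((t : Nat) : Int) by omega, PySem.List.pyGetD_natCast]
      exact pvRow_getD a b k t (Nat.le_of_lt ht')
    have hd2 : PySem.List.pyGetD (pvRow a b k) ((0 : Int) + t + 1) 0 = pvEditB a b (t + 1) k := by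
      rw [show ((0 : Int) + t + 1) = ((t + 1 : Nat) : Int) by omega, PySem.List.pyGetD_natCast]
      exact pvRow_getD a b k (t + 1) ht
    rw [List.range_succ (n := t + 1), List.map_append]
    unfold pvInnerA
    by_cases hc : (a.getD t ' ' == b.getD k ' ') = true
    · rw [if_pos hc, hd1]
      have hstep : pvEditB a b (t + 1) (k + 1) = pvEditB a b t k := by
        simp only [pvEditB]; rw [if_pos hc]
      simp only [List.map_cons, List.map_nil, hstep]
    · rw [if_neg hc, hd1, hd2, hlast]
      have hstep : pvEditB a b (t + 1) (k + 1)
          = 1 + min (pvEditB a b t (k + 1)) (min (pvEditB a b (t + 1) k) (pvEditB a b t k)) := by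
        simp only [pvEditB]; rw [if_neg hc]
      simp only [List.map_cons, List.map_nil, hstep]
      congr 2
      omega

theorem pvOuter_take (a b : List Char) :
    ∀ k, k ≤ b.length →
      (PySem.List.enumerate (b.take k)).foldl (pvOuterA a) (List.range (a.length + 1))
        = pvRow a b k := by
  intro k hk
  induction k with
  | zero =>
    simp [PySem.List.enumerate_nil, pvRow, pvEditB_zero_right, List.map_id']
  | succ k ih =>
    have hk' : k < b.length := hk
    have htake : b.take (k + 1) = b.take k ++ [b.getD k ' '] := by
      rw [List.take_add_one]
      simp [List.getD, List.getElem?_eq_getElem hk']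
    rw [htake, PySem.List.enumerate_append, List.foldl_append, ih (Nat.le_of_lt hk')]
    have hlen : (b.take k).length = k := List.length_take_of_le (Nat.le_of_lt hk')
    simp only [PySem.List.enumerate_cons, PySem.List.enumerate_nil, List.foldl_cons,
      List.foldl_nil, hlen]
    unfold pvOuterA
    have hz : ((0 : Int) + (k : Int)).toNat = k := by omega
    simp only [hz]
    have hfull := pvInner_take a b k a.length (Nat.le_refl _)
    rw [List.take_length] at hfull
    rw [hfull]
    rfl

theorem pyLdist_eq_core (s1 s2 : List Char) :
    PySem.List.pyGetD ((PySem.List.enumerate s2).foldl (pvOuterA s1) (List.range (s1.length + 1))) (-1) 0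
      = pvEditB s1 s2 s1.length s2.length := by
  have h := pvOuter_take s1 s2 s2.length (Nat.le_refl _)
  rw [List.take_length] at h
  rw [h]
  unfold pvRow
  rw [List.range_succ, List.map_append]
  simp [PySem.List.pyGetD_neg_one_append_singleton]

theorem pyLdistB_eq_spec (s1 s2 : List Char) :
    pyLdistB s1 s2 = pvEditB s1 s2 s1.length s2.length := by
  unfold pyLdistB
  exact (pvGo_correct s1 s2 (s1.length + s2.length) s1.length s2.length PySem.Dict.empty
    (Nat.le_refl _) (fun p r hp => by simp [PySem.Dict.get?_empty] at hp)).1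

theorem pyLdist_eq (s1 s2 : List Char) : pyLdistA s1 s2 = pyLdistB s1 s2 := by
  rw [pyLdistB_eq_spec]
  unfold pyLdistA
  by_cases h : s1.length > s2.length
  · simp only [if_pos h]
    rw [pyLdist_eq_core s2 s1, pvEditB_symm]
  · simp only [if_neg h]
    exact pyLdist_eq_core s1 s2

theorem pvFold_eq (text : String) (stations : List String) :
    (stations.foldl (fun (st : Nat × String) station =>
        let value := pyLdistA text.toList station.toList
        if value < st.1 then (value, station) else st) (999999999, "None"))
    = (stations.foldl (fun (st : Nat × String) station =>
        let value := pyLdistB text.toList station.toList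
        if value < st.1 then (value, station) else st) (999999999, "None")) := by
  apply PySem.List.foldl_congr_mem
  intro st station _
  simp [pyLdist_eq]

-- ===== VERDICT (by name: the statement is the Claim_ definition above) =====
theorem right_station_spec : Claim_equal_right_station := by
  intro text stations _
  unfold Spec_right_station right_station right_station_alt
  by_cases hmem : text ∈ (["hob", "nyps", "nps", "sec", "aberdeen", "matawan"] : List String)
  · simp only [List.mem_cons, List.not_mem_nil, or_false] at hmem
    rcases hmem with h | h | h | h | h | h <;> subst h <;>
      simp [pvAbbrev, PySem.Dict.get?_mk_cons]
  · simp only [List.mem_cons, List.not_mem_nil, or_false, not_or] at hmem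
    obtain ⟨h1, h2, h3, h4, h5, h6⟩ := hmem
    have hget : pvAbbrev.get? text = none := by
      simp [pvAbbrev, PySem.Dict.get?, beq_iff_eq,
        Ne.symm h1, Ne.symm h2, Ne.symm h3, Ne.symm h4, Ne.symm h5, Ne.symm h6]
    rw [if_neg (by simp [h1, h2, h3, h4, h5, h6]), hget, pvFold_eq]
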